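-- pv_equiv track=rewrite | github.com/canalqb/teoremas | Teorema_de_Tychonoff/mersenne_teorema.py | gerar_tabela
-- ===== SOURCE A (Python) =====
-- def mersenne(n):
--     return 2**n - 1
--
-- def soma_mersenne_ate(n):
--     # Soma dos números de Mersenne de 1 até n
--     return sum(mersenne(k) for k in range(1, n+1))
--
-- def estimativa(n):
--     """
--     Estimativa que tenta aproximar o valor esperado
--     baseado em potências de 2 e números de Mersenne.
--
--     Aqui usamos:
--     estimativa = 2^n + soma dos mersennes até n-1 dividido por um fator
--     para tentar chegar próximo do valor esperado.
--     """
--     if n == 0: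
--         return 1
--     return 2**n + soma_mersenne_ate(n-1) // 2
--
-- def gerar_tabela(limit_n=9):
--     tabela = []
--     for n in range(limit_n + 1):
--         inicio = 2**n
--         fim = 2**(n+1) - 1
--         est = estimativa(n)
--         tabela.append((n, inicio, fim, est))
--     return tabela
-- ===== SOURCE B (Python) =====
-- def gerar_tabela(limit_n=9):
--     # One pass with a running power of two and the closed form
--     # sum_{k=1}^{n-1} (2^k - 1) = 2^n - n - 1, so est = p + (p - n - 1)//2.
--     tabela = []
--     p = 1  # 2**n
--     for n in range(limit_n + 1):
--         est = 1 if n == 0 else p + (p - n - 1) // 2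
--         tabela.append((n, p, 2 * p - 1, est))
--         p *= 2
--     return tabela
-- ===== Notes on version B (the rewrite author's own statement) =====
-- stated objective: faster
-- what changed: Replaces the per-row recomputation of powers and the nested Mersenne sum by a single pass with a running power of two and the closed form sum_{k=1}^{n-1}(2^k-1) = 2^n - n - 1.
import Mathlib
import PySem

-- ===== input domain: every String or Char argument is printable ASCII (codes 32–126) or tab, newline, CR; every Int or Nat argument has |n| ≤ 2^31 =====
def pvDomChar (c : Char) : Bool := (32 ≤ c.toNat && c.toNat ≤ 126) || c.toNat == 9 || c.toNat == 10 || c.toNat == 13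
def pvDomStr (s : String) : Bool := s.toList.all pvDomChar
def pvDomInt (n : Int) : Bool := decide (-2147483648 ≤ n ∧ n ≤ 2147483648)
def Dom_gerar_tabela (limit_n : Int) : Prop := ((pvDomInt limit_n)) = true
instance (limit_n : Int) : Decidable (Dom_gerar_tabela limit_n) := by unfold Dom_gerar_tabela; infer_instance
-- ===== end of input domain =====

-- B replaces A's per-row nested Mersenne summation by one pass with a running
-- power of two and the closed form sum_{k=1}^{n-1}(2^k-1) = 2^n - n - 1 (faster).

-- ===== PORT A =====
def pyMersenne (n : Int) : Int := 2 ^ n.toNat - 1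

def somaMersenneAte (n : Int) : Int :=
  ((PySem.List.pyRange 1 (n + 1) 1).map (fun k => pyMersenne k)).sum

def estimativa (n : Int) : Int :=
  if n = 0 then 1
  else 2 ^ n.toNat + PySem.Int.floordiv (somaMersenneAte (n - 1)) 2

def stepA (tabela : List (List Int)) (n : Int) : List (List Int) :=
  tabela ++ [[n, 2 ^ n.toNat, 2 ^ (n + 1).toNat - 1, estimativa n]]

def gerar_tabela (limit_n : Int) : List (List Int) :=
  (PySem.List.pyRange 0 (limit_n + 1) 1).foldl stepA []

-- ===== PORT B =====
def stepB (st : List (List Int) × Int) (n : Int) : List (List Int) × Int :=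
  let p := st.2
  let est := if n = 0 then 1 else p + PySem.Int.floordiv (p - n - 1) 2
  (st.1 ++ [[n, p, 2 * p - 1, est]], 2 * p)

def gerar_tabela_alt (limit_n : Int) : List (List Int) :=
  ((PySem.List.pyRange 0 (limit_n + 1) 1).foldl stepB ([], 1)).1

-- ===== PRECONDITION & SPEC =====
def Spec_gerar_tabela (limit_n : Int) (out : List (List Int)) : Prop := out = gerar_tabela_alt limit_n
instance (limit_n : Int) (out : List (List Int)) : Decidable (Spec_gerar_tabela limit_n out) := by unfold Spec_gerar_tabela; infer_instance

-- ===== CLAIM (what is proved, stated in full; the proofs are below) =====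
def Claim_equal_gerar_tabela : Prop := ∀ (limit_n : Int), Dom_gerar_tabela limit_n → Spec_gerar_tabela limit_n (gerar_tabela limit_n)

-- ===== LEMMAS AND PROOFS =====

-- closed form of A's nested Mersenne sum
theorem soma_closed (N : Nat) : somaMersenneAte (N : Int) = 2 ^ (N + 1) - 2 - N := by
  induction N with
  | zero =>
      simp [somaMersenneAte, PySem.List.pyRange_one_eq_nil (by norm_num : (1 : Int) ≤ 1)]
  | succ M ih =>
      have h : ((M : Int) + 1) + 1 = (M : Int) + 1 + 1 := rfl
      have hsplit := PySem.List.pyRange_one_succ_right (a := 1) (b := (M : Int) + 1)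
        (by omega)
      have hcast : ((M + 1 : Nat) : Int) + 1 = ((M : Int) + 1) + 1 := by push_cast; ring
      rw [somaMersenneAte, hcast, hsplit, List.map_append, List.sum_append]
      have : ((PySem.List.pyRange 1 ((M : Int) + 1) 1).map (fun k => pyMersenne k)).sum
          = somaMersenneAte (M : Int) := rfl
      rw [this, ih]
      have htn : ((M : Int) + 1).toNat = M + 1 := by omega
      simp only [List.map_cons, List.map_nil, List.sum_cons, List.sum_nil, pyMersenne, htn]
      have : (2 : Int) ^ (M + 1 + 1) = 2 * 2 ^ (M + 1) := by ring
      rw [this]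
      push_cast
      ring

-- the B fold carries (A's partial table, 2^count)
theorem fold_pair (M : Nat) :
    (PySem.List.pyRange 0 (M : Int) 1).foldl stepB ([], 1)
      = ((PySem.List.pyRange 0 (M : Int) 1).foldl stepA [], 2 ^ M) := by
  induction M with
  | zero =>
      simp [PySem.List.pyRange_one_eq_nil (by norm_num : (0 : Int) ≤ 0)]
  | succ M ih =>
      have hcast : ((M + 1 : Nat) : Int) = (M : Int) + 1 := by push_cast; ring
      have hsplit := PySem.List.pyRange_one_succ_right (a := 0) (b := (M : Int))
        (by omega)
      rw [hcast, hsplit, List.foldl_append, List.foldl_append, ih]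
      simp only [List.foldl_cons, List.foldl_nil]
      unfold stepA stepB
      have htn : (M : Int).toNat = M := Int.toNat_natCast M
      have htn1 : ((M : Int) + 1).toNat = M + 1 := by omega
      by_cases hM : M = 0
      · subst hM
        simp [estimativa]
      · have hMz : (M : Int) ≠ 0 := by exact_mod_cast hM
        have hM1 : ∃ K : Nat, M = K + 1 := ⟨M - 1, by omega⟩
        obtain ⟨K, rfl⟩ := hM1
        have hsub : (↑(K + 1) : Int) - 1 = (K : Int) := by push_cast; ring
        simp only [estimativa, if_neg hMz, hsub, soma_closed K, htn, htn1]
        have h1 : (2 : Int) ^ (K + 1) - (↑(K + 1) : Int) - 1 = 2 ^ (K + 1) - 2 - (K : Int) := by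
          push_cast; ring
        have h2 : (2 : Int) ^ (K + 1 + 1) = 2 * 2 ^ (K + 1) := by ring
        rw [h1, h2]

-- ===== VERDICT (by name: the statement is the Claim_ definition above) =====
theorem gerar_tabela_spec : Claim_equal_gerar_tabela := by
  intro limit_n _
  unfold Spec_gerar_tabela gerar_tabela gerar_tabela_alt
  by_cases h : limit_n + 1 ≤ 0
  · rw [PySem.List.pyRange_one_eq_nil h]
    rfl
  · have h0 : 0 ≤ limit_n + 1 := by omega
    have : limit_n + 1 = ((limit_n + 1).toNat : Int) := by omega
    rw [this, fold_pair]
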